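-- pv_equiv track=rewrite | github.com/Leong-creator/Price-Action-Trader | scripts/m12_29_current_day_scan_dashboard_lib.py | build_visual_definition_rows
-- ===== SOURCE A (Python) =====
-- def build_visual_definition_rows(closure_rows: list[dict[str, str]]) -> list[dict[str, str]]:
--     notes = {
--         "M10-PA-003": ("紧密通道、小回调、顺势延续", "趋势强弱可近似；通道形态仍需代理字段", "过滤器/排名因子"),
--         "M10-PA-004": ("宽通道、边界触碰、边界后反转", "做空分支不稳定；当前只跑做多版", "主线正式账户：只做多版"),
--         "M10-PA-007": ("第一腿、第二腿、陷阱点、反向确认", "复杂图形仍可能漏判，只能先实验账户验证", "实验账户测试"),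
--         "M10-PA-008": ("趋势破坏、二次测试、反转确认", "主要趋势反转仍强依赖上下文", "实验账户测试"),
--         "M10-PA-009": ("三推、楔形/楔形旗形、反转确认", "不强制完美收敛，误判需继续实验验证", "实验账户测试"),
--         "M10-PA-010": ("最终旗形、高潮、TBTL 片段", "组合概念过多，机器触发不稳定", "研究项"),
--         "M10-PA-011": ("开盘反转、开盘失败突破", "历史结果偏弱，但已进实验账户继续测", "实验账户测试"),
--         "M10-PA-013": ("支撑阻力失败测试", "历史结果偏弱，但已进实验账户继续测", "实验账户测试"),
--     }
--     by_id = {row["strategy_id"]: row for row in closure_rows}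
--     rows = []
--     for strategy_id, (machine, limitation, final_status) in notes.items():
--         rows.append(
--             {
--                 "strategy_id": strategy_id,
--                 "strategy_title": by_id.get(strategy_id, {}).get("strategy_title", strategy_id),
--                 "machine_can_identify": machine,
--                 "machine_cannot_claim": limitation,
--                 "final_status": final_status,
--                 "blocks_mainline": "false",
--                 "needs_user_manual_review": "false",
--                 "paper_trial_candidate_now": "false",
--             }
--         )
--     return rows
-- ===== SOURCE B (Python) =====
-- def build_visual_definition_rows(closure_rows: list[dict[str, str]]) -> list[dict[str, str]]:
--     notes = [
--         ("M10-PA-003", "紧密通道、小回调、顺势延续", "趋势强弱可近似；通道形态仍需代理字段", "过滤器/排名因子"),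
--         ("M10-PA-004", "宽通道、边界触碰、边界后反转", "做空分支不稳定；当前只跑做多版", "主线正式账户：只做多版"),
--         ("M10-PA-007", "第一腿、第二腿、陷阱点、反向确认", "复杂图形仍可能漏判，只能先实验账户验证", "实验账户测试"),
--         ("M10-PA-008", "趋势破坏、二次测试、反转确认", "主要趋势反转仍强依赖上下文", "实验账户测试"),
--         ("M10-PA-009", "三推、楔形/楔形旗形、反转确认", "不强制完美收敛，误判需继续实验验证", "实验账户测试"),
--         ("M10-PA-010", "最终旗形、高潮、TBTL 片段", "组合概念过多，机器触发不稳定", "研究项"),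
--         ("M10-PA-011", "开盘反转、开盘失败突破", "历史结果偏弱，但已进实验账户继续测", "实验账户测试"),
--         ("M10-PA-013", "支撑阻力失败测试", "历史结果偏弱，但已进实验账户继续测", "实验账户测试"),
--     ]
--     # Start from default rows (title = strategy_id), then patch titles in one
--     # forward pass over closure_rows; later matches overwrite earlier ones.
--     rows = [
--         {
--             "strategy_id": sid,
--             "strategy_title": sid,
--             "machine_can_identify": machine,
--             "machine_cannot_claim": limitation,
--             "final_status": final_status,
--             "blocks_mainline": "false",
--             "needs_user_manual_review": "false",
--             "paper_trial_candidate_now": "false",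
--         }
--         for sid, machine, limitation, final_status in notes
--     ]
--     for crow in closure_rows:
--         sid = crow["strategy_id"]
--         for r in rows:
--             if r["strategy_id"] == sid:
--                 r["strategy_title"] = crow.get("strategy_title", sid)
--     return rows
-- ===== Notes on version B (the rewrite author's own statement) =====
-- stated objective: alternative
-- what changed: B inverts the join: instead of indexing closure_rows into a last-wins dict and then looking up per notes entry, it first materialises default rows (strategy_title = strategy_id) and then patches titles in a single forward pass over closure_rows, later matches overwriting earlier ones.
import Mathlib
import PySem

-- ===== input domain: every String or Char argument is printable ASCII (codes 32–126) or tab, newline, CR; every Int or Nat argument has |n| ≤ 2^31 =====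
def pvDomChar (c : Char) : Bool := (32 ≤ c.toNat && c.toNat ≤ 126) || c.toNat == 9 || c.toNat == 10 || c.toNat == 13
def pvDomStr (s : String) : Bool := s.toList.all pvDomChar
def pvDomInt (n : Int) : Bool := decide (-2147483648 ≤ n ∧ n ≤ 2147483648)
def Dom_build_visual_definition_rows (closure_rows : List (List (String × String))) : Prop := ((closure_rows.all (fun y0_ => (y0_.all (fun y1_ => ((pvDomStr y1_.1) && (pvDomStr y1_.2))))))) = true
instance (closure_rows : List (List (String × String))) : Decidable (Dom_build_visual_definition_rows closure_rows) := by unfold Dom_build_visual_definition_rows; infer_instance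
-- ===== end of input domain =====

-- B inverts A's join: A builds a last-wins by_id index and looks titles up; B emits default
-- rows first and patches their titles in one forward pass over closure_rows (objective:
-- alternative traversal, same result).

-- ===== PORT A =====
-- notes dict of A (sid -> 3-tuple), in insertion order.
def pvNotes : List (String × (String × String × String)) :=
  [("M10-PA-003", ("紧密通道、小回调、顺势延续", "趋势强弱可近似；通道形态仍需代理字段", "过滤器/排名因子")),
   ("M10-PA-004", ("宽通道、边界触碰、边界后反转", "做空分支不稳定；当前只跑做多版", "主线正式账户：只做多版")),
   ("M10-PA-007", ("第一腿、第二腿、陷阱点、反向确认", "复杂图形仍可能漏判，只能先实验账户验证", "实验账户测试")),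
   ("M10-PA-008", ("趋势破坏、二次测试、反转确认", "主要趋势反转仍强依赖上下文", "实验账户测试")),
   ("M10-PA-009", ("三推、楔形/楔形旗形、反转确认", "不强制完美收敛，误判需继续实验验证", "实验账户测试")),
   ("M10-PA-010", ("最终旗形、高潮、TBTL 片段", "组合概念过多，机器触发不稳定", "研究项")),
   ("M10-PA-011", ("开盘反转、开盘失败突破", "历史结果偏弱，但已进实验账户继续测", "实验账户测试")),
   ("M10-PA-013", ("支撑阻力失败测试", "历史结果偏弱，但已进实验账户继续测", "实验账户测试"))]

-- A's literal row dict for one notes entry.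
def pvMakeRow (sid title machine limitation final_status : String) : List (String × String) :=
  [("strategy_id", sid), ("strategy_title", title), ("machine_can_identify", machine),
   ("machine_cannot_claim", limitation), ("final_status", final_status),
   ("blocks_mainline", "false"), ("needs_user_manual_review", "false"),
   ("paper_trial_candidate_now", "false")]

-- by_id = {row["strategy_id"]: row for row in closure_rows}; row["strategy_id"] raising
-- KeyError (PySem get? = none) is excluded by Pre_, so the none branch is unreachable there.
def build_visual_definition_rows (closure_rows : List (List (String × String))) : List (List (String × String)) :=
  let by_id : PySem.Dict String (List (String × String)) :=
    closure_rows.foldl (fun d row =>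
      match (PySem.Dict.mk row).get? "strategy_id" with
      | some k => d.insert k row
      | none => d) PySem.Dict.empty
  pvNotes.map (fun n =>
    pvMakeRow n.1
      (PySem.Dict.getD (PySem.Dict.mk (by_id.getD n.1 [])) "strategy_title" n.1)
      n.2.1 n.2.2.1 n.2.2.2)

-- ===== PORT B =====
-- B's notes list: flat 4-tuples in the same order.
def bvdrNotes : List (String × String × String × String) :=
  [("M10-PA-003", "紧密通道、小回调、顺势延续", "趋势强弱可近似；通道形态仍需代理字段", "过滤器/排名因子"),
   ("M10-PA-004", "宽通道、边界触碰、边界后反转", "做空分支不稳定；当前只跑做多版", "主线正式账户：只做多版"),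
   ("M10-PA-007", "第一腿、第二腿、陷阱点、反向确认", "复杂图形仍可能漏判，只能先实验账户验证", "实验账户测试"),
   ("M10-PA-008", "趋势破坏、二次测试、反转确认", "主要趋势反转仍强依赖上下文", "实验账户测试"),
   ("M10-PA-009", "三推、楔形/楔形旗形、反转确认", "不强制完美收敛，误判需继续实验验证", "实验账户测试"),
   ("M10-PA-010", "最终旗形、高潮、TBTL 片段", "组合概念过多，机器触发不稳定", "研究项"),
   ("M10-PA-011", "开盘反转、开盘失败突破", "历史结果偏弱，但已进实验账户继续测", "实验账户测试"),
   ("M10-PA-013", "支撑阻力失败测试", "历史结果偏弱，但已进实验账户继续测", "实验账户测试")]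

-- the default row of Source B's comprehension: strategy_title starts as the strategy_id itself.
def bvdrDefault (n : String × String × String × String) : List (String × String) :=
  [("strategy_id", n.1), ("strategy_title", n.1), ("machine_can_identify", n.2.1),
   ("machine_cannot_claim", n.2.2.1), ("final_status", n.2.2.2),
   ("blocks_mainline", "false"), ("needs_user_manual_review", "false"),
   ("paper_trial_candidate_now", "false")]

-- r["strategy_title"] = v ported as overwrite-in-place on the pair list; exact here because
-- "strategy_title" is a key of every row B builds (Python dict assignment overwrites in place).
def bvdrPatch (crow : List (String × String)) (sid : String) (r : List (String × String)) : List (String × String) :=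
  if (PySem.Dict.mk r).get? "strategy_id" == some sid then
    r.map (fun p => if p.1 == "strategy_title"
                    then (p.1, PySem.Dict.getD (PySem.Dict.mk crow) "strategy_title" sid)
                    else p)
  else r

-- sid = crow["strategy_id"]: a missing key is KeyError (outside Pre_), the none branch is unreachable there.
def build_visual_definition_rows_alt (closure_rows : List (List (String × String))) : List (List (String × String)) :=
  closure_rows.foldl (fun rows crow =>
      match (PySem.Dict.mk crow).get? "strategy_id" with
      | some sid => rows.map (bvdrPatch crow sid)
      | none => rows)
    (bvdrNotes.map bvdrDefault)

-- ===== PRECONDITION & SPEC =====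
-- Pre_ excludes inputs where some row lacks the "strategy_id" key: there A raises KeyError (no return value).
def Pre_build_visual_definition_rows (closure_rows : List (List (String × String))) : Prop :=
  ∀ row ∈ closure_rows, ((PySem.Dict.mk row).get? "strategy_id").isSome
instance (closure_rows : List (List (String × String))) : Decidable (Pre_build_visual_definition_rows closure_rows) := by unfold Pre_build_visual_definition_rows; infer_instance

def pvWitness_build_visual_definition_rows : (List (List (String × String))) :=
  [[("strategy_id", "M10-PA-004"), ("strategy_title", "Wide channel")]]

def Spec_build_visual_definition_rows (closure_rows : List (List (String × String))) (out : List (List (String × String))) : Prop := out = build_visual_definition_rows_alt closure_rows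
instance (closure_rows : List (List (String × String))) (out : List (List (String × String))) : Decidable (Spec_build_visual_definition_rows closure_rows out) := by unfold Spec_build_visual_definition_rows; infer_instance

-- ===== CLAIM (what is proved, stated in full; the proofs are below) =====
def Claim_equal_build_visual_definition_rows : Prop := ∀ (closure_rows : List (List (String × String))), Dom_build_visual_definition_rows closure_rows → Pre_build_visual_definition_rows closure_rows → Spec_build_visual_definition_rows closure_rows (build_visual_definition_rows closure_rows)

-- ===== LEMMAS AND PROOFS =====

-- B's per-closure-row step, as a pointwise map.
def bvdrStep (crow : List (String × String)) (r : List (String × String)) : List (String × String) :=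
  match (PySem.Dict.mk crow).get? "strategy_id" with
  | some sid => bvdrPatch crow sid r
  | none => r

theorem bvdr_step_map (rows : List (List (String × String))) (crow : List (String × String)) :
    (match (PySem.Dict.mk crow).get? "strategy_id" with
     | some sid => rows.map (bvdrPatch crow sid)
     | none => rows) = rows.map (bvdrStep crow) := by
  unfold bvdrStep
  cases (PySem.Dict.mk crow).get? "strategy_id" <;> simp

-- a fold of pointwise maps is a map of pointwise folds
theorem bvdr_fold_map' (l : List (List (String × String))) :
    ∀ rows : List (List (String × String)),
    l.foldl (fun rows crow => rows.map (bvdrStep crow)) rows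
      = rows.map (fun r => l.foldl (fun r crow => bvdrStep crow r) r) := by
  induction l with
  | nil => intro rows; simp
  | cons x l ih =>
    intro rows
    simp only [List.foldl_cons, ih, List.map_map]
    rfl

theorem bvdr_fold_map (l : List (List (String × String))) :
    ∀ rows : List (List (String × String)),
    l.foldl (fun rows crow =>
        match (PySem.Dict.mk crow).get? "strategy_id" with
        | some sid => rows.map (bvdrPatch crow sid)
        | none => rows) rows
      = rows.map (fun r => l.foldl (fun r crow => bvdrStep crow r) r) := by
  intro rows
  rw [← bvdr_fold_map' l rows]
  congr 1
  funext rows crow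
  exact bvdr_step_map rows crow

-- patching a default-shaped row only rewrites its title
theorem bvdr_step_default (n : String × String × String × String) (t : String) (crow : List (String × String)) :
    bvdrStep crow (pvMakeRow n.1 t n.2.1 n.2.2.1 n.2.2.2)
      = pvMakeRow n.1
          (match (PySem.Dict.mk crow).get? "strategy_id" with
           | some sid => if sid = n.1 then PySem.Dict.getD (PySem.Dict.mk crow) "strategy_title" n.1 else t
           | none => t)
          n.2.1 n.2.2.1 n.2.2.2 := by
  unfold bvdrStep bvdrPatch
  cases h : (PySem.Dict.mk crow).get? "strategy_id" with
  | none => rfl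
  | some sid =>
    by_cases hs : sid = n.1
    · subst hs
      simp [pvMakeRow, PySem.Dict.get?_mk_cons]
    · simp only [pvMakeRow, PySem.Dict.get?_mk_cons]
      simp [hs, Ne.symm hs]

-- folding patches over a default row = the row with the title fold
theorem bvdr_fold_default (n : String × String × String × String) :
    ∀ (l : List (List (String × String))) (t : String),
    l.foldl (fun r crow => bvdrStep crow r) (pvMakeRow n.1 t n.2.1 n.2.2.1 n.2.2.2)
      = pvMakeRow n.1
          (l.foldl (fun t crow =>
            match (PySem.Dict.mk crow).get? "strategy_id" with
            | some sid => if sid = n.1 then PySem.Dict.getD (PySem.Dict.mk crow) "strategy_title" n.1 else t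
            | none => t) t)
          n.2.1 n.2.2.1 n.2.2.2 := by
  intro l
  induction l with
  | nil => intro t; rfl
  | cons x l ih =>
    intro t
    simp only [List.foldl_cons, bvdr_step_default, ih]

-- A's index-fold lookup returns the LAST closure row carrying the key.
theorem pv_fold_get (sid : String) :
    ∀ (rows : List (List (String × String))) (d : PySem.Dict String (List (String × String))),
    (∀ row ∈ rows, ((PySem.Dict.mk row).get? "strategy_id").isSome) →
    (rows.foldl (fun d row =>
        match (PySem.Dict.mk row).get? "strategy_id" with
        | some k => d.insert k row
        | none => d) d).get? sid
      = (match rows.reverse.find? (fun row => (PySem.Dict.mk row).get? "strategy_id" == some sid) with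
         | some row => some row
         | none => d.get? sid) := by
  intro rows
  induction rows with
  | nil => intro d _; simp
  | cons r rest ih =>
    intro d hpre
    have hr := hpre r (by simp)
    obtain ⟨k, hk⟩ := Option.isSome_iff_exists.mp hr
    have hrest : ∀ row ∈ rest, ((PySem.Dict.mk row).get? "strategy_id").isSome := by
      intro row hm; exact hpre row (by simp [hm])
    simp only [List.foldl_cons, hk, List.reverse_cons, List.find?_append]
    rw [ih (d.insert k r) hrest]
    cases hfind : rest.reverse.find? (fun row => (PySem.Dict.mk row).get? "strategy_id" == some sid) with
    | some row => simp
    | none =>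
      simp only [Option.none_or]
      by_cases hks : sid = k
      · subst hks
        simp [hk, PySem.Dict.get?_insert_self]
      · have : ((PySem.Dict.mk r).get? "strategy_id" == some sid) = false := by
          simp [hk]; exact fun h => hks h.symm
        simp [this, PySem.Dict.get?_insert_of_ne d r hks]

-- B's forward title fold returns the LAST matching row's title (or the default).
theorem bvdr_title_fold (sid : String) :
    ∀ (l : List (List (String × String))) (t : String),
    (∀ row ∈ l, ((PySem.Dict.mk row).get? "strategy_id").isSome) →
    l.foldl (fun t crow =>
        match (PySem.Dict.mk crow).get? "strategy_id" with
        | some k => if k = sid then PySem.Dict.getD (PySem.Dict.mk crow) "strategy_title" sid else t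
        | none => t) t
      = (match l.reverse.find? (fun row => (PySem.Dict.mk row).get? "strategy_id" == some sid) with
         | some row => PySem.Dict.getD (PySem.Dict.mk row) "strategy_title" sid
         | none => t) := by
  intro l
  induction l with
  | nil => intro t _; simp
  | cons x l ih =>
    intro t hpre
    have hx := hpre x (by simp)
    obtain ⟨k, hk⟩ := Option.isSome_iff_exists.mp hx
    have hrest : ∀ row ∈ l, ((PySem.Dict.mk row).get? "strategy_id").isSome := by
      intro row hm; exact hpre row (by simp [hm])
    simp only [List.foldl_cons, hk, List.reverse_cons, List.find?_append]
    rw [ih _ hrest]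
    cases hfind : l.reverse.find? (fun row => (PySem.Dict.mk row).get? "strategy_id" == some sid) with
    | some row => simp
    | none =>
      simp only [Option.none_or]
      by_cases hks : k = sid
      · subst hks
        simp [hk]
      · have : ((PySem.Dict.mk x).get? "strategy_id" == some sid) = false := by
          simp [hk]; exact hks
        simp [hks, this]

-- the two notes tables describe the same rows
theorem bvdr_notes_eq :
    bvdrNotes.map bvdrDefault
      = pvNotes.map (fun n => pvMakeRow n.1 n.1 n.2.1 n.2.2.1 n.2.2.2) := by
  rfl

-- ===== VERDICT (by name: the statement is the Claim_ definition above) =====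
theorem build_visual_definition_rows_spec : Claim_equal_build_visual_definition_rows := by
  intro closure_rows _ hpre
  unfold Spec_build_visual_definition_rows build_visual_definition_rows build_visual_definition_rows_alt
  rw [bvdr_fold_map, bvdr_notes_eq, List.map_map]
  apply List.map_congr_left
  intro n _
  simp only [Function.comp]
  rw [bvdr_fold_default]
  congr 1
  rw [bvdr_title_fold n.1 closure_rows n.1 hpre]
  have h := pv_fold_get n.1 closure_rows PySem.Dict.empty hpre
  cases hfind : closure_rows.reverse.find? (fun row => (PySem.Dict.mk row).get? "strategy_id" == some n.1) with
  | some row =>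
    rw [hfind] at h
    rw [PySem.Dict.getD_of_get?_eq_some _ _ h]
  | none =>
    rw [hfind, PySem.Dict.get?_empty] at h
    rw [PySem.Dict.getD_of_get?_eq_none _ _ h]
    rfl
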